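-- pv_equiv track=rewrite | github.com/MatiasValdesdesdes/problemasmatrices | problemasmas.py | insertar_en_orden
-- ===== SOURCE A (Python) =====
-- def insertar_en_orden(matriz, elemento):
--     for fila in matriz:
--         if elemento <= fila[-1]:
--             for i in range(len(fila)):
--                 if elemento <= fila[i]:
--                     fila.insert(i, elemento)
--                     return matriz
--     matriz[-1].append(elemento)
--     return matriz
-- ===== SOURCE B (Python) =====
-- # Two staged take-while splits with explicit accumulators, pure (no in-place mutation;
-- # the return value is identical to A's).
-- def insertar_en_orden(matriz, elemento):
--     # phase 1: peel off the rows whose last element is smaller than elemento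
--     antes = []
--     resto = list(matriz)
--     while resto and elemento > resto[0][-1]:
--         antes.append(resto.pop(0))
--     if not resto:
--         # no row accepts elemento: append it to the last row
--         return matriz[:-1] + [matriz[-1] + [elemento]]
--     # phase 2: split the accepting row at the first element >= elemento
--     izq = []
--     der = list(resto[0])
--     while der and der[0] < elemento:
--         izq.append(der.pop(0))
--     return antes + [izq + [elemento] + der] + resto[1:]
-- ===== Notes on version B (the rewrite author's own statement) =====
-- stated objective: alternative
-- what changed: Replaces A's nested first-fit loops with early returns and in-place fila.insert by a pure two-phase split: a take-while pass peels off rows whose last element is too small, then a take-while pass splits the accepting row, and the result is rebuilt from the three pieces (argument left unmutated).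
import Mathlib
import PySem

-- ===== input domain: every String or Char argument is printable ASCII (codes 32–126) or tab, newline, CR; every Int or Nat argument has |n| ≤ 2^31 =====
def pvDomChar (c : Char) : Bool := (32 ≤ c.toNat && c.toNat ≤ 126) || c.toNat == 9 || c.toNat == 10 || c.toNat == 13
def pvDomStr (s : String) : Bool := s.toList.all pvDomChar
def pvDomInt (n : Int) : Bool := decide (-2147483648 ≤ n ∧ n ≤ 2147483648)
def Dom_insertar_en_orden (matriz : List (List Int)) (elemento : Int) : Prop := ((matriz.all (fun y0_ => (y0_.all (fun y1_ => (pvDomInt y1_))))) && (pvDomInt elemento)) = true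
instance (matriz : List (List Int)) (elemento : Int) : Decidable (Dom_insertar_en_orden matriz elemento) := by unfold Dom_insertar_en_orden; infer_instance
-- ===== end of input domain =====

-- B rebuilds the result from two staged take-while splits instead of A's mutating nested
-- loops (A mutates its argument; the equivalence proved here is about the return value).
-- Objective: alternative.

-- ===== PORT A =====
-- inner loop 'for i in range(len(fila)): if elemento <= fila[i]: fila.insert(i, elemento); return matriz'
-- as structural recursion; 'some' = the row with elemento inserted at the first fitting index,
-- 'none' = the inner loop fell through without returning.
def pvInnerA (e : Int) : List Int → Option (List Int)
  | [] => none
  | x :: xs => if e ≤ x then some (e :: x :: xs) else (pvInnerA e xs).map (x :: ·)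

-- outer loop; 'none' = no row triggered.  When 'fila[-1]' is an IndexError (empty row reached),
-- Python raises; the port returns 'none' there as junk — exactly those inputs are outside Pre_.
def pvLoopA (e : Int) : List (List Int) → Option (List (List Int))
  | [] => none
  | fila :: resto =>
    match PySem.List.pyGet? fila (-1) with
    | none => none
    | some ultimo =>
      if e ≤ ultimo then
        match pvInnerA e fila with
        | some fila' => some (fila' :: resto)
        | none => (pvLoopA e resto).map (fila :: ·)
      else (pvLoopA e resto).map (fila :: ·)

def insertar_en_orden (matriz : List (List Int)) (elemento : Int) : List (List Int) :=
  match pvLoopA elemento matriz with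
  | some out => out
  -- 'matriz[-1].append(elemento)': value of the mutated matriz; on matriz = [] Python raises
  -- (IndexError, outside Pre_) and the port returns junk
  | none => matriz.dropLast ++ [matriz.getLastD [] ++ [elemento]]

-- ===== PORT B =====
-- phase 1: 'while resto and elemento > resto[0][-1]: antes.append(resto.pop(0))' as a
-- tail recursion over (antes, resto).  On an empty row 'resto[0][-1]' raises in Python;
-- the port stops the loop there as junk — those inputs are outside Pre_.
def pvFase1 (e : Int) (antes : List (List Int)) : List (List Int) → (List (List Int)) × (List (List Int))
  | [] => (antes, [])
  | fila :: resto =>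
    match PySem.List.pyGet? fila (-1) with
    | none => (antes, fila :: resto)
    | some ultimo =>
      if e > ultimo then pvFase1 e (antes ++ [fila]) resto
      else (antes, fila :: resto)

-- phase 2: 'while der and der[0] < elemento: izq.append(der.pop(0))' as a tail recursion.
def pvFase2 (e : Int) (izq : List Int) : List Int → (List Int) × (List Int)
  | [] => (izq, [])
  | x :: der => if x < e then pvFase2 e (izq ++ [x]) der else (izq, x :: der)

def insertar_en_orden_alt (matriz : List (List Int)) (elemento : Int) : List (List Int) :=
  match pvFase1 elemento [] matriz with
  -- 'if not resto: return matriz[:-1] + [matriz[-1] + [elemento]]'; on matriz = [] Python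
  -- raises (outside Pre_) and the port returns junk
  | (_, []) => matriz.dropLast ++ [matriz.getLastD [] ++ [elemento]]
  | (antes, fila :: resto1) =>
    match pvFase2 elemento [] fila with
    | (izq, der) => antes ++ [izq ++ [elemento] ++ der] ++ resto1

-- ===== PRECONDITION & SPEC =====
-- Pre_ excludes exactly the inputs where A raises IndexError: an empty matrix, or an empty row
-- reached before any row that accepts elemento ('fila[-1]' on []).  B raises there too.
def Pre_insertar_en_orden (matriz : List (List Int)) (elemento : Int) : Prop :=
  matriz ≠ [] ∧ ∀ i ∈ List.range matriz.length, matriz.getD i [] = [] →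
    ∃ j ∈ List.range i, matriz.getD j [] ≠ [] ∧ elemento ≤ (matriz.getD j []).getLastD 0
instance (matriz : List (List Int)) (elemento : Int) : Decidable (Pre_insertar_en_orden matriz elemento) := by
  unfold Pre_insertar_en_orden; infer_instance

def pvWitness_insertar_en_orden : List (List Int) × Int := ([[1, 3], [5, 7]], 2)

def Spec_insertar_en_orden (matriz : List (List Int)) (elemento : Int) (out : List (List Int)) : Prop := out = insertar_en_orden_alt matriz elemento
instance (matriz : List (List Int)) (elemento : Int) (out : List (List Int)) : Decidable (Spec_insertar_en_orden matriz elemento out) := by unfold Spec_insertar_en_orden; infer_instance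

-- ===== CLAIM (what is proved, stated in full; the proofs are below) =====
def Claim_equal_insertar_en_orden : Prop := ∀ (matriz : List (List Int)) (elemento : Int), Dom_insertar_en_orden matriz elemento → Pre_insertar_en_orden matriz elemento → Spec_insertar_en_orden matriz elemento (insertar_en_orden matriz elemento)

-- ===== LEMMAS AND PROOFS =====

-- the second conjunct of Pre_, stated over an arbitrary suffix of the matrix
def pvOk (e : Int) (m : List (List Int)) : Prop :=
  ∀ i ∈ List.range m.length, m.getD i [] = [] →
    ∃ j ∈ List.range i, m.getD j [] ≠ [] ∧ e ≤ (m.getD j []).getLastD 0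

lemma pvOk_head (e : Int) (fila : List Int) (t : List (List Int)) (h : pvOk e (fila :: t)) :
    fila ≠ [] := by
  intro hf
  obtain ⟨j, hj, -⟩ := h 0 (by simp) (by simpa using hf)
  simp at hj

lemma pvOk_tail (e : Int) (fila : List Int) (t : List (List Int))
    (h : pvOk e (fila :: t)) (hno : ¬ e ≤ fila.getLastD 0) : pvOk e t := by
  intro i hi hempty
  have hi' : i < t.length := by simpa using hi
  obtain ⟨j, hj, hne, hle⟩ := h (i + 1) (by simp; omega) (by simpa using hempty)
  have hj' : j < i + 1 := by simpa using hj
  cases j with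
  | zero =>
    simp only [List.getD_cons_zero] at hle
    exact absurd hle hno
  | succ k =>
    simp only [List.getD_cons_succ] at hne hle
    exact ⟨k, by simp; omega, hne, hle⟩

-- phase-2 accumulator lemma: the loop computes a span of the row
lemma pvFase2_acc (e : Int) (acc xs : List Int) :
    pvFase2 e acc xs = (acc ++ xs.takeWhile (fun x => decide (x < e)),
                        xs.dropWhile (fun x => decide (x < e))) := by
  induction xs generalizing acc with
  | nil => simp [pvFase2]
  | cons x t ih =>
    by_cases h : x < e
    · simp [pvFase2, h, ih]
    · simp [pvFase2, h]

-- A's first-fit scan, when it fires, inserts exactly at the takeWhile/dropWhile split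
lemma pvInnerA_char (e : Int) (xs : List Int) (hne : xs ≠ []) (hle : e ≤ xs.getLastD 0) :
    pvInnerA e xs = some (xs.takeWhile (fun x => decide (x < e)) ++ e ::
                          xs.dropWhile (fun x => decide (x < e))) := by
  induction xs with
  | nil => exact absurd rfl hne
  | cons x t ih =>
    by_cases h : e ≤ x
    · have hx : ¬ x < e := by omega
      simp [pvInnerA, h, hx]
    · have hx : x < e := by omega
      cases t with
      | nil => simp [List.getLastD] at hle; omega
      | cons y t' =>
        have hle' : e ≤ (y :: t').getLastD 0 := by simpa [List.getLastD] using hle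
        show (if e ≤ x then some (e :: x :: y :: t')
              else (pvInnerA e (y :: t')).map (x :: ·)) = _
        rw [if_neg h, ih (by simp) hle']
        simp [List.takeWhile_cons, List.dropWhile_cons, hx]

-- phase-1 accumulator lemma
lemma pvFase1_acc (e : Int) (acc m : List (List Int)) :
    pvFase1 e acc m = (acc ++ (pvFase1 e [] m).1, (pvFase1 e [] m).2) := by
  induction m generalizing acc with
  | nil => simp [pvFase1]
  | cons fila t ih =>
    cases hg : PySem.List.pyGet? fila (-1) with
    | none => simp [pvFase1, hg]
    | some u =>
      by_cases h : e > u
      · rw [pvFase1, pvFase1, hg]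
        simp only [if_pos h]
        rw [ih (acc ++ [fila]), ih ([] ++ [fila])]
        simp
      · simp [pvFase1, hg, h]

-- main invariant: under pvOk, A's loop result is determined by B's phase-1 split
lemma pvLoop_eq_fases (e : Int) (m : List (List Int)) (hok : pvOk e m) :
    pvLoopA e m =
      match pvFase1 e [] m with
      | (_, []) => none
      | (antes, fila :: t) =>
        match pvFase2 e [] fila with
        | (izq, der) => some (antes ++ [izq ++ [e] ++ der] ++ t) := by
  induction m with
  | nil => rfl
  | cons fila t ih =>
    have hne : fila ≠ [] := pvOk_head e fila t hok
    have hg : PySem.List.pyGet? fila (-1) = some (fila.getLastD 0) := by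
      rw [PySem.List.pyGet?_neg_one]
      cases fila with
      | nil => exact absurd rfl hne
      | cons a b =>
        cases hgl : (a :: b).getLast? with
        | none => simp [List.getLast?_eq_none_iff] at hgl
        | some v => simp [hgl]
    by_cases h : e ≤ fila.getLastD 0
    · rw [pvLoopA, hg]
      simp only [if_pos h]
      rw [pvInnerA_char e fila hne h]
      rw [pvFase1, hg]
      simp only [if_neg (by omega : ¬ e > fila.getLastD 0)]
      rw [pvFase2_acc]
      simp
    · rw [pvLoopA, hg]
      simp only [if_neg h]
      rw [pvFase1, hg]
      simp only [if_pos (by omega : e > fila.getLastD 0)]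
      rw [pvFase1_acc]
      rw [ih (pvOk_tail e fila t hok h)]
      cases h1 : pvFase1 e [] t with
      | mk antes resto =>
        cases resto with
        | nil => simp
        | cons g r =>
          cases h2 : pvFase2 e [] g with
          | mk izq der => simp

-- ===== VERDICT (by name: the statement is the Claim_ definition above) =====
theorem insertar_en_orden_spec : Claim_equal_insertar_en_orden := by
  intro matriz elemento _ hpre
  unfold Spec_insertar_en_orden insertar_en_orden insertar_en_orden_alt
  rw [pvLoop_eq_fases elemento matriz hpre.2]
  cases h1 : pvFase1 elemento [] matriz with
  | mk antes resto =>
    cases resto with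
    | nil => simp
    | cons g r =>
      cases h2 : pvFase2 elemento [] g with
      | mk izq der => simp
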